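-- pv_equiv track=rewrite | github.com/sarahduve/ev-fire-risk | score_garages.py | _score_dob_now_fire_systems
-- ===== SOURCE A (Python) =====
-- def _score_dob_now_fire_systems(dob_now_recs):
--     """Other DOB NOW device_types: sprinklers, emergency power, photoluminescent,
--     structurally-compromised buildings. Small volumes, flat weights."""
--     if not dob_now_recs:
--         return 0, []
--     points = 0
--     parts = []
--     if any(r.get("class") == "sprinkler" for r in dob_now_recs):
--         points += 6
--         parts.append("sprinkler system filing")
--     if any(r.get("class") == "emergency_power" for r in dob_now_recs):
--         points += 6
--         parts.append("emergency power filing")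
--     if any(r.get("class") == "photoluminescent" for r in dob_now_recs):
--         points += 1
--         parts.append("exit-sign filing")
--     if any(r.get("class") == "structurally_compromised" for r in dob_now_recs):
--         points += 8
--         parts.append("structurally compromised")
--     if points == 0:
--         return 0, []
--     return points, [f"DOB NOW open {', '.join(parts)} violation(s) (+{points})"]
-- ===== SOURCE B (Python) =====
-- def _score_dob_now_fire_systems(dob_now_recs):
--     """Single pass over the records ORs together a 4-bit presence mask
--     (one bit per known class); points and parts are then decoded from the
--     mask by bit arithmetic, so no repeated scans of the record list."""
--     BIT = {
--         "sprinkler": 1,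
--         "emergency_power": 2,
--         "photoluminescent": 4,
--         "structurally_compromised": 8,
--     }
--     mask = 0
--     for r in dob_now_recs:
--         mask |= BIT.get(r.get("class"), 0)
--     if mask == 0:
--         return 0, []
--     points = 6 * (mask & 1) + 6 * ((mask >> 1) & 1) + ((mask >> 2) & 1) + 8 * ((mask >> 3) & 1)
--     parts = [label for bit, label in (
--         (1, "sprinkler system filing"),
--         (2, "emergency power filing"),
--         (4, "exit-sign filing"),
--         (8, "structurally compromised"),
--     ) if mask & bit]
--     return points, [f"DOB NOW open {', '.join(parts)} violation(s) (+{points})"]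
-- ===== Notes on version B (the rewrite author's own statement) =====
-- stated objective: alternative
-- what changed: B makes one pass over the records OR-ing a 4-bit presence bitmask, then decodes points and part labels from the mask by bit arithmetic, instead of A's four separate any() scans with incremental accumulation.
import Mathlib
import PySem

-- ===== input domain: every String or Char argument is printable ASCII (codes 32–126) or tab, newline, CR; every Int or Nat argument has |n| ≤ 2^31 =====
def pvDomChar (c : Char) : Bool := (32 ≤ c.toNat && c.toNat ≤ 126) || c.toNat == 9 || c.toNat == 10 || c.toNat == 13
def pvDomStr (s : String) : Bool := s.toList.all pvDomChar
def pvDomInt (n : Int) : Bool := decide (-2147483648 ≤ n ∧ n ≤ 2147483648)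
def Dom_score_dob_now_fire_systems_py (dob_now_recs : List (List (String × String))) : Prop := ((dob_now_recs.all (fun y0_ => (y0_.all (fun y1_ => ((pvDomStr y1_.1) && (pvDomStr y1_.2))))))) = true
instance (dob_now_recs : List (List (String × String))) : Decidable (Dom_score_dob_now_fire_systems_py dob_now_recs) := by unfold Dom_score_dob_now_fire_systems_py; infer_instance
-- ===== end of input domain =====

-- ===== PORT A =====
-- B replaces A's four any() scans with one bitmask-building pass plus bit-arithmetic decoding (alternative).
-- r.get("class"): first match on the association list, exact Python dict semantics
def pvGetClass (r : List (String × String)) : Option String := (PySem.Dict.mk r).get? "class"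

def score_dob_now_fire_systems_py (dob_now_recs : List (List (String × String))) : Int × List String :=
  if dob_now_recs = [] then (0, [])
  else
    let points : Int := 0
    let parts : List String := []
    let (points, parts) :=
      if dob_now_recs.any (fun r => pvGetClass r == some "sprinkler") then
        (points + 6, parts ++ ["sprinkler system filing"]) else (points, parts)
    let (points, parts) :=
      if dob_now_recs.any (fun r => pvGetClass r == some "emergency_power") then
        (points + 6, parts ++ ["emergency power filing"]) else (points, parts)
    let (points, parts) :=
      if dob_now_recs.any (fun r => pvGetClass r == some "photoluminescent") then
        (points + 1, parts ++ ["exit-sign filing"]) else (points, parts)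
    let (points, parts) :=
      if dob_now_recs.any (fun r => pvGetClass r == some "structurally_compromised") then
        (points + 8, parts ++ ["structurally compromised"]) else (points, parts)
    if points = 0 then (0, [])
    else (points, ["DOB NOW open " ++ PySem.Str.join ", " parts ++ " violation(s) (+" ++ PySem.Int.toStr points ++ ")"])

-- ===== PORT B =====
-- BIT.get(r.get("class"), 0): the lookup key may be None (missing "class"), so the
-- dict lookup over Option String keys is ported by hand as this exact match (exact).
def pvBitOf (r : List (String × String)) : Nat :=
  match pvGetClass r with
  | some c =>
      if c = "sprinkler" then 1
      else if c = "emergency_power" then 2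
      else if c = "photoluminescent" then 4
      else if c = "structurally_compromised" then 8
      else 0
  | none => 0

def score_dob_now_fire_systems_py_alt (dob_now_recs : List (List (String × String))) : Int × List String :=
  let mask : Nat := dob_now_recs.foldl (fun m r => m ||| pvBitOf r) 0
  if mask = 0 then (0, [])
  else
    let points : Int := 6 * ((mask &&& 1 : Nat) : Int) + 6 * (((mask >>> 1) &&& 1 : Nat) : Int)
                        + (((mask >>> 2) &&& 1 : Nat) : Int) + 8 * (((mask >>> 3) &&& 1 : Nat) : Int)
    let parts : List String :=
      (([(1, "sprinkler system filing"), (2, "emergency power filing"),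
         (4, "exit-sign filing"), (8, "structurally compromised")] : List (Nat × String)).filter
        (fun p => mask &&& p.1 ≠ 0)).map Prod.snd
    (points, ["DOB NOW open " ++ PySem.Str.join ", " parts ++ " violation(s) (+" ++ PySem.Int.toStr points ++ ")"])

-- ===== PRECONDITION & SPEC =====
def Spec_score_dob_now_fire_systems_py (dob_now_recs : List (List (String × String))) (out : Int × List String) : Prop := out = score_dob_now_fire_systems_py_alt dob_now_recs
instance (dob_now_recs : List (List (String × String))) (out : Int × List String) : Decidable (Spec_score_dob_now_fire_systems_py dob_now_recs out) := by unfold Spec_score_dob_now_fire_systems_py; infer_instance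

-- ===== CLAIM (what is proved, stated in full; the proofs are below) =====
def Claim_equal_score_dob_now_fire_systems_py : Prop := ∀ (dob_now_recs : List (List (String × String))), Dom_score_dob_now_fire_systems_py dob_now_recs → Spec_score_dob_now_fire_systems_py dob_now_recs (score_dob_now_fire_systems_py dob_now_recs)

-- ===== LEMMAS AND PROOFS =====
-- the mask of a list, and its closed form from the four presence booleans
def pvMask (l : List (List (String × String))) : Nat := l.foldl (fun m r => m ||| pvBitOf r) 0

def pvG (b1 b2 b3 b4 : Bool) : Nat :=
  (cond b1 1 0) ||| (cond b2 2 0) ||| (cond b3 4 0) ||| (cond b4 8 0)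

theorem pvMask_acc (l : List (List (String × String))) :
    ∀ acc : Nat, l.foldl (fun m r => m ||| pvBitOf r) acc = acc ||| pvMask l := by
  induction l with
  | nil => intro acc; simp [pvMask]
  | cons r t ih =>
      intro acc
      simp only [pvMask, List.foldl_cons, Nat.zero_or] at *
      rw [ih (acc ||| pvBitOf r), ih (pvBitOf r), Nat.or_assoc]

theorem pvMask_cons (r : List (String × String)) (l : List (List (String × String))) :
    pvMask (r :: l) = pvBitOf r ||| pvMask l := by
  simp only [pvMask, List.foldl_cons, Nat.zero_or]
  exact pvMask_acc l (pvBitOf r)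

theorem pvG_or1 (b1 b2 b3 b4 : Bool) : 1 ||| pvG b1 b2 b3 b4 = pvG true b2 b3 b4 := by
  cases b1 <;> cases b2 <;> cases b3 <;> cases b4 <;> decide
theorem pvG_or2 (b1 b2 b3 b4 : Bool) : 2 ||| pvG b1 b2 b3 b4 = pvG b1 true b3 b4 := by
  cases b1 <;> cases b2 <;> cases b3 <;> cases b4 <;> decide
theorem pvG_or4 (b1 b2 b3 b4 : Bool) : 4 ||| pvG b1 b2 b3 b4 = pvG b1 b2 true b4 := by
  cases b1 <;> cases b2 <;> cases b3 <;> cases b4 <;> decide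
theorem pvG_or8 (b1 b2 b3 b4 : Bool) : 8 ||| pvG b1 b2 b3 b4 = pvG b1 b2 b3 true := by
  cases b1 <;> cases b2 <;> cases b3 <;> cases b4 <;> decide

theorem pvMask_eq (l : List (List (String × String))) :
    pvMask l = pvG (l.any (fun r => pvGetClass r == some "sprinkler"))
                   (l.any (fun r => pvGetClass r == some "emergency_power"))
                   (l.any (fun r => pvGetClass r == some "photoluminescent"))
                   (l.any (fun r => pvGetClass r == some "structurally_compromised")) := by
  induction l with
  | nil => simp [pvMask, pvG]
  | cons r t ih =>
      rw [pvMask_cons, ih]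
      simp only [List.any_cons]
      by_cases h1 : pvGetClass r = some "sprinkler"
      · simp [pvBitOf, h1, pvG_or1]
      · by_cases h2 : pvGetClass r = some "emergency_power"
        · simp [pvBitOf, h2, pvG_or2]
        · by_cases h3 : pvGetClass r = some "photoluminescent"
          · simp [pvBitOf, h3, pvG_or4]
          · by_cases h4 : pvGetClass r = some "structurally_compromised"
            · simp [pvBitOf, h4, pvG_or8]
            · match hc : pvGetClass r with
              | none => simp [pvBitOf, hc]
              | some c =>
                  have e1 : (pvGetClass r == some "sprinkler") = false := beq_eq_false_iff_ne.mpr h1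
                  have e2 : (pvGetClass r == some "emergency_power") = false := beq_eq_false_iff_ne.mpr h2
                  have e3 : (pvGetClass r == some "photoluminescent") = false := beq_eq_false_iff_ne.mpr h3
                  have e4 : (pvGetClass r == some "structurally_compromised") = false := beq_eq_false_iff_ne.mpr h4
                  have hb : pvBitOf r = 0 := by
                    rw [hc] at h1 h2 h3 h4
                    simp only [Option.some.injEq] at h1 h2 h3 h4
                    simp [pvBitOf, hc, h1, h2, h3, h4]
                  have f1 : (some c == (some "sprinkler" : Option String)) = false := by rw [← hc]; exact e1
                  have f2 : (some c == (some "emergency_power" : Option String)) = false := by rw [← hc]; exact e2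
                  have f3 : (some c == (some "photoluminescent" : Option String)) = false := by rw [← hc]; exact e3
                  have f4 : (some c == (some "structurally_compromised" : Option String)) = false := by rw [← hc]; exact e4
                  rw [hb]
                  simp only [f1, f2, f3, f4, Bool.false_or, Nat.zero_or]

-- ===== VERDICT (by name: the statement is the Claim_ definition above) =====
theorem score_dob_now_fire_systems_py_spec : Claim_equal_score_dob_now_fire_systems_py := by
  intro l _
  unfold Spec_score_dob_now_fire_systems_py
  unfold score_dob_now_fire_systems_py score_dob_now_fire_systems_py_alt
  rw [show l.foldl (fun m r => m ||| pvBitOf r) 0 = pvMask l from rfl, pvMask_eq]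
  by_cases h0 : l = []
  · subst h0; simp [pvG]
  · by_cases h1 : l.any (fun r => pvGetClass r == some "sprinkler") <;>
      by_cases h2 : l.any (fun r => pvGetClass r == some "emergency_power") <;>
        by_cases h3 : l.any (fun r => pvGetClass r == some "photoluminescent") <;>
          by_cases h4 : l.any (fun r => pvGetClass r == some "structurally_compromised") <;>
            simp [h0, h1, h2, h3, h4, pvG]
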